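-- pv_equiv track=rewrite | github.com/0X6C7879/aegissec | apps/api/app/compat/skills/identifiers.py | iter_skill_identifier_candidates
-- ===== SOURCE A (Python) =====
-- def normalize_skill_identifier(identifier: str) -> str:
--     stripped = identifier.strip()
--     if not stripped:
--         return ""
--
--     normalized = stripped.replace("\\", "/").casefold()
--     if "/" not in normalized:
--         return normalized
--
--     parts = [part.strip() for part in normalized.split("/") if part.strip()]
--     return "/".join(parts)
--
-- def iter_skill_identifier_candidates(identifier: str) -> tuple[str, ...]:
--     normalized = normalize_skill_identifier(identifier)
--     if not normalized:
--         return ()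
--
--     candidates = [normalized]
--     if "/" not in normalized:
--         return tuple(candidates)
--
--     parts = normalized.split("/")
--     for end in range(len(parts) - 1, 0, -1):
--         candidate = "/".join(parts[:end])
--         if candidate and candidate not in candidates:
--             candidates.append(candidate)
--     return tuple(candidates)
-- ===== SOURCE B (Python) =====
-- def normalize_skill_identifier(identifier: str) -> str:
--     stripped = identifier.strip()
--     if not stripped:
--         return ""
--
--     normalized = stripped.replace("\\", "/").casefold()
--     if "/" not in normalized:
--         return normalized
--
--     parts = [part.strip() for part in normalized.split("/") if part.strip()]
--     return "/".join(parts)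
--
-- def iter_skill_identifier_candidates(identifier: str) -> tuple[str, ...]:
--     normalized = normalize_skill_identifier(identifier)
--     if not normalized:
--         return ()
--     if "/" not in normalized:
--         return (normalized,)
--     # one forward pass: accumulate growing prefixes, then reverse
--     prefix = None
--     acc = []
--     for part in normalized.split("/"):
--         prefix = part if prefix is None else prefix + "/" + part
--         acc.append(prefix)
--     return tuple(reversed(acc))
-- ===== Notes on version B (the rewrite author's own statement) =====
-- stated objective: simpler
-- what changed: B replaces A's backward loop that re-slices parts[:end] and re-joins for every end (with a dedup membership test that never fires) by a single forward pass accumulating growing slash-joined prefixes and reversing the accumulator.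
import Mathlib
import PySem

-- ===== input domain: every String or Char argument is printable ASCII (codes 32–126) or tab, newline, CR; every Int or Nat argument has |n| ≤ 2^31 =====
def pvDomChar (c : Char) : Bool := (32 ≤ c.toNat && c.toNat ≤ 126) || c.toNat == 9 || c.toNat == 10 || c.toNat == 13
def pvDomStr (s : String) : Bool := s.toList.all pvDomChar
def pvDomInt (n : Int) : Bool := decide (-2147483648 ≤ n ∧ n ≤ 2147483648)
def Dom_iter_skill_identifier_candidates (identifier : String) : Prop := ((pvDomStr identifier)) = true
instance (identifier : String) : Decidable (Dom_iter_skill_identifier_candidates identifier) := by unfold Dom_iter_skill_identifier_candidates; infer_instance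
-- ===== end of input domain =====

-- B replaces A's quadratic suffix-of-prefixes loop (re-join parts[:end] for each end,
-- with a dead dedup test) by one forward pass that accumulates growing prefixes and
-- reverses the result (objective: simpler single pass).


-- ===== PORT A =====
-- shared helper: Python's normalize_skill_identifier (identical in Source A and Source B), on List Char
def normalize_skill_identifier_chars (identifier : List Char) : List Char :=
  let stripped := PySem.Chars.strip identifier
  if stripped.isEmpty then []
  else
    -- casefold ported as lower: exact on the ASCII domain
    let normalized := PySem.Chars.lower (PySem.Chars.replace stripped ['\\'] ['/'])
    if !(PySem.Chars.isIn ['/'] normalized) then normalized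
    else
      let parts := ((PySem.Chars.splitOn normalized ['/']).map PySem.Chars.strip).filter
        (fun p => !p.isEmpty)
      PySem.Chars.join ['/'] parts

def iter_skill_identifier_candidates (identifier : String) : List String :=
  let normalized := normalize_skill_identifier_chars identifier.toList
  if normalized.isEmpty then []
  else
    let candidates := [normalized]
    if !(PySem.Chars.isIn ['/'] normalized) then candidates.map String.ofList
    else
      let parts := PySem.Chars.splitOn normalized ['/']
      let candidates := (PySem.List.pyRange ((parts.length : Int) - 1) 0 (-1)).foldl
        (fun cs e =>
          let candidate := PySem.Chars.join ['/'] (PySem.List.slice parts none (some e))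
          if !candidate.isEmpty && !(cs.contains candidate) then cs ++ [candidate] else cs)
        candidates
      candidates.map String.ofList

-- ===== PORT B =====
def iter_skill_identifier_candidates_alt (identifier : String) : List String :=
  let normalized := normalize_skill_identifier_chars identifier.toList
  if normalized.isEmpty then []
  else if !(PySem.Chars.isIn ['/'] normalized) then [String.ofList normalized]
  else
    let st := (PySem.Chars.splitOn normalized ['/']).foldl
      (fun (st : Option (List Char) × List (List Char)) part =>
        let pref := match st.1 with
          | none => part
          | some pre => pre ++ '/' :: part
        (some pref, st.2 ++ [pref]))
      (none, [])
    st.2.reverse.map String.ofList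

-- ===== PRECONDITION & SPEC =====
def Spec_iter_skill_identifier_candidates (identifier : String) (out : List String) : Prop := out = iter_skill_identifier_candidates_alt identifier
instance (identifier : String) (out : List String) : Decidable (Spec_iter_skill_identifier_candidates identifier out) := by unfold Spec_iter_skill_identifier_candidates; infer_instance

-- ===== CLAIM (what is proved, stated in full; the proofs are below) =====
def Claim_equal_iter_skill_identifier_candidates : Prop := ∀ (identifier : String), Dom_iter_skill_identifier_candidates identifier → Spec_iter_skill_identifier_candidates identifier (iter_skill_identifier_candidates identifier)

-- ===== LEMMAS AND PROOFS =====

-- a simple structural model of splitting on the single character '/'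
def mySplit : List Char → List (List Char)
  | [] => [[]]
  | c :: rest => if c = '/' then [] :: mySplit rest else (mySplit rest).modifyHead (c :: ·)

theorem mySplit_ne_nil (s : List Char) : mySplit s ≠ [] := by
  induction s with
  | nil => simp [mySplit]
  | cons c rest ih =>
    simp only [mySplit]
    split_ifs
    · simp
    · intro h; exact ih (by simpa using List.modifyHead_eq_nil_iff.mp h)

theorem splitOn_go_spec : ∀ (fuel : Nat) (l cur : List Char) (acc : List (List Char)),
    l.length ≤ fuel →
    PySem.Chars.splitOn.go ['/'] fuel l cur acc
      = acc.reverse ++ (mySplit l).modifyHead (cur.reverse ++ ·) := by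
  intro fuel
  induction fuel with
  | zero =>
    intro l cur acc h
    have : l = [] := List.length_eq_zero_iff.mp (Nat.le_zero.mp h)
    subst this
    simp [PySem.Chars.splitOn.go, mySplit]
  | succ n ih =>
    intro l cur acc h
    cases l with
    | nil => simp [PySem.Chars.splitOn.go, mySplit]
    | cons c rest =>
      simp only [PySem.Chars.splitOn.go]
      by_cases hc : c = '/'
      · subst hc
        have hpre : List.isPrefixOf ['/'] ('/' :: rest) = true := by
          simp [List.isPrefixOf]
        rw [if_pos hpre]
        have hdrop : List.drop (['/'] : List Char).length ('/' :: rest) = rest := rfl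
        rw [hdrop, ih rest [] ((cur.reverse) :: acc) (by simpa using Nat.le_of_succ_le_succ h)]
        simp [mySplit]
        cases mySplit rest <;> simp
      · have hpre : List.isPrefixOf ['/'] (c :: rest) = false := by
          simp [List.isPrefixOf]
          exact fun h => hc h.symm
        rw [if_neg (by simp [hpre])]
        rw [ih rest (c :: cur) acc (by simpa using Nat.le_of_succ_le_succ h)]
        have hne := mySplit_ne_nil rest
        cases hms : mySplit rest with
        | nil => exact absurd hms hne
        | cons hd tl => simp [mySplit, hc, hms]

theorem splitOn_eq_mySplit (s : List Char) :
    PySem.Chars.splitOn s ['/'] = mySplit s := by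
  have h := splitOn_go_spec (s.length + 1) s [] [] (by omega)
  have hne := mySplit_ne_nil s
  cases hms : mySplit s with
  | nil => exact absurd hms hne
  | cons hd tl =>
    rw [PySem.Chars.splitOn, h, hms]
    simp

theorem mem_mySplit_no_slash (s p : List Char) (hp : p ∈ mySplit s) : '/' ∉ p := by
  induction s generalizing p with
  | nil => simp [mySplit] at hp; subst hp; simp
  | cons c rest ih =>
    simp only [mySplit] at hp
    split_ifs at hp with hc
    · rcases List.mem_cons.mp hp with h | h
      · subst h; simp
      · exact ih p h
    · cases hms : mySplit rest with
      | nil => exact absurd hms (mySplit_ne_nil rest)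
      | cons hd tl =>
        rw [hms] at hp
        simp only [List.modifyHead] at hp
        rcases List.mem_cons.mp hp with h | h
        · subst h
          intro hmem
          rcases List.mem_cons.mp hmem with h' | h'
          · exact hc h'.symm
          · exact ih hd (by simp [hms]) h'
        · exact ih p (by simp [hms, h])

theorem mySplit_no_slash (p : List Char) (hp : '/' ∉ p) : mySplit p = [p] := by
  induction p with
  | nil => simp [mySplit]
  | cons c rest ih =>
    have hc : c ≠ '/' := fun h => hp (by simp [h])
    have hrest : '/' ∉ rest := fun h => hp (by simp [h])
    simp [mySplit, hc, ih hrest]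

theorem mySplit_append_slash (p t : List Char) (hp : '/' ∉ p) :
    mySplit (p ++ '/' :: t) = p :: mySplit t := by
  induction p with
  | nil => simp [mySplit]
  | cons c rest ih =>
    have hc : c ≠ '/' := fun h => hp (by simp [h])
    have hrest : '/' ∉ rest := fun h => hp (by simp [h])
    simp [mySplit, hc, ih hrest]

theorem mySplit_join (parts : List (List Char)) (hne : parts ≠ [])
    (hp : ∀ p ∈ parts, '/' ∉ p) :
    mySplit (PySem.Chars.join ['/'] parts) = parts := by
  induction parts with
  | nil => exact absurd rfl hne
  | cons p rest ih =>
    cases rest with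
    | nil => rw [PySem.Chars.join_singleton]; exact mySplit_no_slash p (hp p (by simp))
    | cons q tl =>
      rw [PySem.Chars.join_cons_cons]
      have : p ++ ['/'] ++ PySem.Chars.join ['/'] (q :: tl)
           = p ++ '/' :: PySem.Chars.join ['/'] (q :: tl) := by simp
      rw [this, mySplit_append_slash p _ (hp p (by simp))]
      rw [ih (by simp) (fun r hr => hp r (by simp [hr]))]

-- join over a snoc
theorem join_append_single (xs : List (List Char)) (y : List Char) (h : xs ≠ []) :
    PySem.Chars.join ['/'] (xs ++ [y]) = PySem.Chars.join ['/'] xs ++ '/' :: y := by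
  induction xs with
  | nil => exact absurd rfl h
  | cons p rest ih =>
    cases rest with
    | nil => rw [PySem.Chars.join_singleton]; simp [PySem.Chars.join_cons_cons]
    | cons q tl =>
      have := ih (by simp)
      simp only [List.cons_append] at *
      rw [PySem.Chars.join_cons_cons, PySem.Chars.join_cons_cons, this]
      simp

theorem join_take_succ (q : List (List Char)) (k : Nat) (hk : 1 ≤ k) (hkn : k < q.length) :
    PySem.Chars.join ['/'] (q.take (k + 1))
      = PySem.Chars.join ['/'] (q.take k) ++ '/' :: q[k] := by
  rw [List.take_succ, List.getElem?_eq_getElem hkn]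
  simp only [Option.toList_some]
  exact join_append_single _ _ (by
    intro h0
    rcases List.take_eq_nil_iff.mp h0 with h1 | h1
    · omega
    · subst h1; simp at hkn)

theorem join_take_ne_nil (q : List (List Char)) (hq : ∀ p ∈ q, p ≠ [])
    (k : Nat) (hk : 1 ≤ k) (hkn : k ≤ q.length) :
    PySem.Chars.join ['/'] (q.take k) ≠ [] := by
  cases hq' : q with
  | nil => subst hq'; simp at hkn; omega
  | cons p rest =>
    subst hq'
    cases k with
    | zero => omega
    | succ m =>
      simp only [List.take_succ_cons]
      cases hr : rest.take m with
      | nil => rw [PySem.Chars.join_singleton]; exact hq p (by simp)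
      | cons a b =>
        rw [PySem.Chars.join_cons_cons]
        intro h
        simp at h

theorem join_take_length_lt (q : List (List Char)) (hq : ∀ p ∈ q, p ≠ [])
    (i j : Nat) (hi : 1 ≤ i) (hij : i < j) (hj : j ≤ q.length) :
    (PySem.Chars.join ['/'] (q.take i)).length < (PySem.Chars.join ['/'] (q.take j)).length := by
  induction j with
  | zero => omega
  | succ m ih =>
    by_cases him : i = m
    · subst him
      rw [join_take_succ q i hi (by omega)]
      simp
    · have h1 := ih (by omega) (by omega)
      calc (PySem.Chars.join ['/'] (q.take i)).length
          < (PySem.Chars.join ['/'] (q.take m)).length := h1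
        _ ≤ (PySem.Chars.join ['/'] (q.take (m + 1))).length := by
            rw [join_take_succ q m (by omega) (by omega)]; simp

-- descending range: pyRange a 0 (-1) with a = (n : Nat)
theorem pyRange_desc (n : Nat) :
    PySem.List.pyRange (n : Int) 0 (-1) = (List.range n).reverse.map (fun k => ((k + 1 : Nat) : Int)) := by
  simp only [PySem.List.pyRange]
  norm_num
  by_cases hn : 0 < n
  · rw [if_pos (by exact_mod_cast hn)]
    apply List.ext_getElem
    · simp
    · intro i h1 h2
      simp only [List.length_map, List.length_reverse, List.length_range] at h1 h2
      simp only [List.getElem_map, List.getElem_reverse, List.getElem_range,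
        List.length_map, List.length_range, List.length_reverse]
      push_cast
      omega
  · rw [if_neg (by omega)]
    have : n = 0 := by omega
    subst this
    simp

-- the A-side fold over descending ends, starting from the already-collected longer prefixes
theorem a_fold_spec (q : List (List Char)) (hq : ∀ p ∈ q, p ≠ [])
    (k : Nat) (hk : k + 1 ≤ q.length) :
    ((List.range k).reverse.map (fun j => ((j + 1 : Nat) : Int))).foldl
      (fun cs e =>
        let candidate := PySem.Chars.join ['/'] (PySem.List.slice q none (some e))
        if !candidate.isEmpty && !(cs.contains candidate) then cs ++ [candidate] else cs)
      ((List.range' (k + 1) (q.length - k)).reverse.map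
        (fun j => PySem.Chars.join ['/'] (q.take j)))
      = (List.range' 1 q.length).reverse.map (fun j => PySem.Chars.join ['/'] (q.take j)) := by
  induction k with
  | zero => simp
  | succ m ih =>
    rw [List.range_succ]
    simp only [List.reverse_append, List.reverse_singleton, List.map_append, List.map_cons,
      List.map_nil, List.singleton_append, List.foldl_cons]
    have hslice : PySem.List.slice q none (some (((m + 1 : Nat)) : Int)) = q.take (m + 1) :=
      PySem.List.slice_to_natCast q (m + 1)
    have hcand_ne : (PySem.Chars.join ['/'] (q.take (m + 1))).isEmpty = false := by
      rw [List.isEmpty_eq_false_iff]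
      exact join_take_ne_nil q hq (m + 1) (by omega) (by omega)
    have hnotmem : ((List.range' (m + 2) (q.length - (m + 1))).reverse.map
        (fun j => PySem.Chars.join ['/'] (q.take j))).contains
          (PySem.Chars.join ['/'] (q.take (m + 1))) = false := by
      rw [Bool.eq_false_iff]
      intro hcon
      have hmem := List.contains_iff_mem.mp hcon
      simp only [List.mem_map, List.mem_reverse, List.mem_range'_1] at hmem
      obtain ⟨j, ⟨hj1, hj2⟩, hj3⟩ := hmem
      have := join_take_length_lt q hq (m + 1) j (by omega) (by omega) (by omega)
      rw [hj3] at this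
      omega
    have hstep : (List.range' (m + 2) (q.length - (m + 1))).reverse.map
          (fun j => PySem.Chars.join ['/'] (q.take j)) ++ [PySem.Chars.join ['/'] (q.take (m + 1))]
        = (List.range' (m + 1) (q.length - m)).reverse.map
          (fun j => PySem.Chars.join ['/'] (q.take j)) := by
      have hc : q.length - m = (q.length - (m + 1)) + 1 := by omega
      rw [hc, List.range'_succ]
      simp
    simp only [hslice, hcand_ne, hnotmem, Bool.not_false, Bool.and_self, if_pos, hstep]
    exact ih (by omega)

-- characters of strip s come from s
theorem mem_of_mem_strip {c : Char} {s : List Char} (h : c ∈ PySem.Chars.strip s) : c ∈ s := by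
  simp only [PySem.Chars.strip, PySem.Chars.rstrip, PySem.Chars.lstrip] at h
  rw [List.mem_reverse] at h
  have h1 := (List.dropWhile_sublist (l := (List.dropWhile PySem.Chars.isspace s).reverse)
    (p := PySem.Chars.isspace)).mem h
  rw [List.mem_reverse] at h1
  exact (List.dropWhile_sublist (l := s) (p := PySem.Chars.isspace)).mem h1

-- in the slash branch, the normalized identifier is a '/'-join of nonempty slash-free parts
theorem normalize_slash_decomp (s : List Char)
    (h : PySem.Chars.isIn ['/'] (normalize_skill_identifier_chars s) = true) :
    ∃ q : List (List Char), q ≠ [] ∧ (∀ p ∈ q, p ≠ [] ∧ '/' ∉ p) ∧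
      normalize_skill_identifier_chars s = PySem.Chars.join ['/'] q := by
  unfold normalize_skill_identifier_chars at *
  dsimp only at h ⊢
  split_ifs at * with h1 h2
  · rw [PySem.Chars.isIn_iff_infix] at h
    simp at h
  · simp at h2
    rw [h2] at h
    simp at h
  · refine ⟨((PySem.Chars.splitOn (PySem.Chars.lower (PySem.Chars.replace (PySem.Chars.strip s)
      ['\\'] ['/'])) ['/']).map PySem.Chars.strip).filter (fun p => !p.isEmpty), ?_, ?_, rfl⟩
    · intro hq
      rw [hq, PySem.Chars.join_nil, PySem.Chars.isIn_iff_infix] at h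
      simp at h
    · intro p hp
      rw [List.mem_filter] at hp
      obtain ⟨hp1, hp2⟩ := hp
      rw [List.mem_map] at hp1
      obtain ⟨p', hp', hps⟩ := hp1
      constructor
      · simpa using hp2
      · rw [splitOn_eq_mySplit] at hp'
        intro hc
        exact mem_mySplit_no_slash _ p' hp' (mem_of_mem_strip (hps ▸ hc))

-- growing-prefix chain, the model of B's accumulator
def prefCh : List Char → List (List Char) → List (List Char)
  | _, [] => []
  | pre, t :: ts => (pre ++ '/' :: t) :: prefCh (pre ++ '/' :: t) ts

theorem b_fold_some (ts : List (List Char)) : ∀ (pre : List Char) (acc : List (List Char)),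
    ts.foldl (fun (st : Option (List Char) × List (List Char)) part =>
        let pref := match st.1 with
          | none => part
          | some pre => pre ++ '/' :: part
        (some pref, st.2 ++ [pref])) (some pre, acc)
      = (some (ts.foldl (fun a t => a ++ '/' :: t) pre), acc ++ prefCh pre ts) := by
  induction ts with
  | nil => intro pre acc; simp [prefCh]
  | cons t ts ih =>
    intro pre acc
    simp only [List.foldl_cons, prefCh]
    rw [ih]
    simp

theorem prefCh_spec (q : List (List Char)) (n : Nat) : ∀ (k : Nat), 1 ≤ k → k ≤ q.length →
    q.length - k = n →
    prefCh (PySem.Chars.join ['/'] (q.take k)) (q.drop k)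
      = (List.range' (k + 1) (q.length - k)).map
          (fun j => PySem.Chars.join ['/'] (q.take j)) := by
  induction n with
  | zero =>
    intro k hk1 hk2 hk3
    have : q.drop k = [] := List.drop_eq_nil_of_le (by omega)
    rw [this, hk3, prefCh]
    simp
  | succ n ih =>
    intro k hk1 hk2 hk3
    have hklt : k < q.length := by omega
    rw [List.drop_eq_getElem_cons hklt]
    simp only [prefCh]
    rw [← join_take_succ q k hk1 hklt]
    rw [ih (k + 1) (by omega) (by omega) (by omega)]
    rw [hk3]
    have : q.length - (k + 1) = n := by omega
    rw [this, List.range'_succ]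
    simp

theorem b_fold_snd (q : List (List Char)) (hne : q ≠ []) :
    (q.foldl (fun (st : Option (List Char) × List (List Char)) part =>
        let pref := match st.1 with
          | none => part
          | some pre => pre ++ '/' :: part
        (some pref, st.2 ++ [pref])) (none, [])).2
      = (List.range' 1 q.length).map (fun j => PySem.Chars.join ['/'] (q.take j)) := by
  cases q with
  | nil => exact absurd rfl hne
  | cons t ts =>
    simp only [List.foldl_cons]
    rw [b_fold_some]
    have ht1 : PySem.Chars.join ['/'] ((t :: ts).take 1) = t := by
      simp [PySem.Chars.join_singleton]
    have := prefCh_spec (t :: ts) ts.length 1 (by omega) (by simp) (by simp)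
    rw [ht1] at this
    have hdrop : (t :: ts).drop 1 = ts := rfl
    rw [hdrop] at this
    simp only [this]
    have hlen : (t :: ts).length = ts.length + 1 := by simp
    rw [hlen, List.range'_succ]
    simp [ht1]

theorem main_eq (identifier : String) :
    iter_skill_identifier_candidates identifier = iter_skill_identifier_candidates_alt identifier := by
  unfold iter_skill_identifier_candidates iter_skill_identifier_candidates_alt
  by_cases h0 : (normalize_skill_identifier_chars identifier.toList).isEmpty
  · simp only [h0, if_pos]
  · simp only [h0, Bool.false_eq_true, if_neg, if_false]
    by_cases h1 : PySem.Chars.isIn ['/'] (normalize_skill_identifier_chars identifier.toList)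
    · simp only [h1, Bool.not_true, Bool.false_eq_true, if_false]
      obtain ⟨q, hqne, hqprop, hqeq⟩ := normalize_slash_decomp identifier.toList h1
      have hq1 : ∀ p ∈ q, p ≠ [] := fun p hp => (hqprop p hp).1
      have hq2 : ∀ p ∈ q, '/' ∉ p := fun p hp => (hqprop p hp).2
      have hparts : PySem.Chars.splitOn (normalize_skill_identifier_chars identifier.toList) ['/'] = q := by
        rw [hqeq, splitOn_eq_mySplit]
        exact mySplit_join q hqne hq2
      rw [hparts]
      have hqlen : 1 ≤ q.length := by
        cases q with
        | nil => exact absurd rfl hqne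
        | cons a b => simp
      have hcast : ((q.length : Int) - 1) = (((q.length - 1 : Nat)) : Int) := by omega
      rw [hcast, pyRange_desc]
      have hinit : [normalize_skill_identifier_chars identifier.toList]
          = (List.range' ((q.length - 1) + 1) (q.length - (q.length - 1))).reverse.map
              (fun j => PySem.Chars.join ['/'] (q.take j)) := by
        have h2 : (q.length - 1) + 1 = q.length := by omega
        have h3 : q.length - (q.length - 1) = 1 := by omega
        rw [h2, h3, List.range'_one]
        simp [List.take_length, hqeq]
      rw [hinit, a_fold_spec q hq1 (q.length - 1) (by omega)]
      rw [b_fold_snd q hqne]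
      rw [List.map_reverse]
    · simp only [h1, Bool.not_false, if_pos, List.map]

theorem iter_skill_identifier_candidates_spec : Claim_equal_iter_skill_identifier_candidates := by
  intro identifier _
  unfold Spec_iter_skill_identifier_candidates
  exact main_eq identifier
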